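-- pv_equiv track=rewrite | github.com/jflowers/slackfeeder | src/drive_upload.py | _should_share_with_member
-- ===== SOURCE A (Python) =====
-- from typing import Any, Dict, List, Optional, Set, Tuple
--
-- def _should_share_with_member(
--     member_id: str,
--     user_info: Optional[Dict[str, str]],
--     share_members: Optional[List[str]],
-- ) -> bool:
--     """Check if a member should be shared with based on shareMembers list.
--
--     Args:
--         member_id: Slack user ID
--         user_info: User info dictionary with slackId, email, displayName
--         share_members: Optional list of identifiers (user IDs, emails, or display names)
--
--     Returns:
--         True if member should be shared with, False otherwise
--     """
--     if not share_members or len(share_members) == 0: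
--         # No shareMembers list or empty list = share with all (backward compatible)
--         return True
--
--     if not user_info:
--         return False
--
--     # Normalize identifiers for comparison
--     user_slack_id = user_info.get("slackId", "").lower()
--     user_email = user_info.get("email", "").lower()
--     user_display_name = user_info.get("displayName", "").strip().lower()
--
--     # Check each identifier in shareMembers
--     for identifier in share_members:
--         if not identifier:
--             continue
--
--         identifier_lower = identifier.strip().lower()
--
--         # Match by Slack user ID
--         if identifier_lower == user_slack_id:
--             return True
--
--         # Match by email
--         if user_email and identifier_lower == user_email:
--             return True
--
--         # Match by display name (case-insensitive)
--         if user_display_name and identifier_lower == user_display_name: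
--             return True
--
--     # Not found in shareMembers list
--     return False
-- ===== SOURCE B (Python) =====
-- def _should_share_with_member(member_id, user_info, share_members):
--     if not share_members:
--         return True
--     if not user_info:
--         return False
--     # Normalize the share list once, sort it, and answer each of the three
--     # candidate-identifier queries by binary search in the sorted list.
--     norm = sorted(s.strip().lower() for s in share_members if s)
--
--     def found(key):
--         lo, hi = 0, len(norm)
--         while lo < hi:
--             mid = (lo + hi) // 2
--             if norm[mid] < key:
--                 lo = mid + 1
--             else:
--                 hi = mid
--         return lo < len(norm) and norm[lo] == key
--
--     if found(user_info.get("slackId", "").lower()):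
--         return True
--     email = user_info.get("email", "").lower()
--     if email and found(email):
--         return True
--     display = user_info.get("displayName", "").strip().lower()
--     return bool(display) and found(display)
-- ===== Notes on version B (the rewrite author's own statement) =====
-- stated objective: alternative
-- what changed: Instead of A's linear scan of share_members with a three-way branch per entry, B normalizes the share list once into a sorted list and answers each of the three candidate-identifier queries (slackId always; email/displayName only when non-empty) by a hand-written binary search.
import Mathlib
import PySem

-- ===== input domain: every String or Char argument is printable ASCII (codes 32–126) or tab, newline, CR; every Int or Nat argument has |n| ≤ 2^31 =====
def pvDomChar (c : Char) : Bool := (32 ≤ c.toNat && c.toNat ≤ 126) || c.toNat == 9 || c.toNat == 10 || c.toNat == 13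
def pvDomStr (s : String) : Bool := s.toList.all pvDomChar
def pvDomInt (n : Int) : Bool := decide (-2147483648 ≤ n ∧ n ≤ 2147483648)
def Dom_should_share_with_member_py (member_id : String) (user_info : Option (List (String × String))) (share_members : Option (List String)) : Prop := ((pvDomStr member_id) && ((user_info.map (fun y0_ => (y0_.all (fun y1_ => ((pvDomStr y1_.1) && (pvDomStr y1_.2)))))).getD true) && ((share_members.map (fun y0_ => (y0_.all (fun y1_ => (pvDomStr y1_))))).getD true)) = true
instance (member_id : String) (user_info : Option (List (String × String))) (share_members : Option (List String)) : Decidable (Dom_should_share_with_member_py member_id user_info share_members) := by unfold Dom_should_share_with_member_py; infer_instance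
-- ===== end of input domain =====

-- B replaces A's linear scan (three-way branch per share_members entry) by a sorted
-- normalized list queried by binary search for each candidate identifier (objective: alternative).

-- ===== PORT A =====
-- A's for-loop over share_members, branches in A's order
def pvLoopA (sid em dn : String) : List String → Bool
  | [] => false
  | id :: rest =>
    if id = "" then pvLoopA sid em dn rest
    else
      let il := PySem.Str.lower (PySem.Str.strip id)
      if il = sid then true
      else if em ≠ "" ∧ il = em then true
      else if dn ≠ "" ∧ il = dn then true
      else pvLoopA sid em dn rest

def should_share_with_member_py (_member_id : String) (user_info : Option (List (String × String))) (share_members : Option (List String)) : Bool :=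
  match share_members with
  | none => true
  | some sm =>
    if sm.isEmpty then true
    else
      match user_info with
      | none => false
      | some ui =>
        if ui.isEmpty then false
        else
          let user_slack_id := PySem.Str.lower (PySem.Dict.getD ⟨ui⟩ "slackId" "")
          let user_email := PySem.Str.lower (PySem.Dict.getD ⟨ui⟩ "email" "")
          let user_display_name := PySem.Str.lower (PySem.Str.strip (PySem.Dict.getD ⟨ui⟩ "displayName" ""))
          pvLoopA user_slack_id user_email user_display_name sm

-- ===== PORT B =====
-- B's while-loop binary search (norm[mid] read with getD; only reached with mid < norm.length)
def pvBS (norm : List String) (key : String) (lo hi : Nat) : Nat :=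
  if _h : lo < hi then
    let mid := (lo + hi) / 2
    if norm.getD mid "" < key then pvBS norm key (mid + 1) hi
    else pvBS norm key lo mid
  else lo
termination_by hi - lo
decreasing_by all_goals omega

def pvFound (norm : List String) (key : String) : Bool :=
  let lo := pvBS norm key 0 norm.length
  decide (lo < norm.length) && (norm.getD lo "" == key)

def should_share_with_member_py_alt (_member_id : String) (user_info : Option (List (String × String))) (share_members : Option (List String)) : Bool :=
  match share_members with
  | none => true
  | some sm =>
    if sm.isEmpty then true
    else
      match user_info with
      | none => false
      | some ui =>
        if ui.isEmpty then false
        else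
          let norm := PySem.List.sorted ((sm.filter (fun s => s ≠ "")).map (fun s => PySem.Str.lower (PySem.Str.strip s))) (fun x => x) false
          if pvFound norm (PySem.Str.lower (PySem.Dict.getD ⟨ui⟩ "slackId" "")) then true
          else
            let email := PySem.Str.lower (PySem.Dict.getD ⟨ui⟩ "email" "")
            if email ≠ "" ∧ pvFound norm email then true
            else
              let display := PySem.Str.lower (PySem.Str.strip (PySem.Dict.getD ⟨ui⟩ "displayName" ""))
              decide (display ≠ "") && pvFound norm display

-- ===== PRECONDITION & SPEC =====
def Spec_should_share_with_member_py (member_id : String) (user_info : Option (List (String × String))) (share_members : Option (List String)) (out : Bool) : Prop := out = should_share_with_member_py_alt member_id user_info share_members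
instance (member_id : String) (user_info : Option (List (String × String))) (share_members : Option (List String)) (out : Bool) : Decidable (Spec_should_share_with_member_py member_id user_info share_members out) := by unfold Spec_should_share_with_member_py; infer_instance

-- ===== CLAIM (what is proved, stated in full; the proofs are below) =====
def Claim_equal_should_share_with_member_py : Prop := ∀ (member_id : String) (user_info : Option (List (String × String))) (share_members : Option (List String)), Dom_should_share_with_member_py member_id user_info share_members → Spec_should_share_with_member_py member_id user_info share_members (should_share_with_member_py member_id user_info share_members)

-- ===== LEMMAS AND PROOFS =====

-- A's loop returns true iff some non-empty identifier normalizes to an acceptable value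
theorem pvLoopA_eq_true_iff (sid em dn : String) (sm : List String) :
    pvLoopA sid em dn sm = true ↔
      ∃ id ∈ sm, id ≠ "" ∧
        (PySem.Str.lower (PySem.Str.strip id) = sid ∨
         (em ≠ "" ∧ PySem.Str.lower (PySem.Str.strip id) = em) ∨
         (dn ≠ "" ∧ PySem.Str.lower (PySem.Str.strip id) = dn)) := by
  induction sm with
  | nil => simp [pvLoopA]
  | cons id rest ih =>
    simp only [pvLoopA]
    split_ifs with h1 h2 h3 h4 <;> simp_all

-- a (≤)-pairwise list is monotone in its indices (read through getD)
theorem pvGetD_mono (norm : List String) (hs : norm.Pairwise (· ≤ ·))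
    {i j : Nat} (hij : i ≤ j) (hj : j < norm.length) :
    norm.getD i "" ≤ norm.getD j "" := by
  rcases Nat.lt_or_eq_of_le hij with h | h
  · rw [norm.getD_eq_getElem "" (by omega), norm.getD_eq_getElem "" hj]
    exact List.pairwise_iff_getElem.mp hs i j (by omega) hj h
  · subst h; exact le_refl _

-- binary-search loop invariant: everything left of the result is < key, nothing from the result on is
theorem pvBS_spec (norm : List String) (key : String) (hs : norm.Pairwise (· ≤ ·)) :
    ∀ (n lo hi : Nat), hi - lo = n → hi ≤ norm.length → lo ≤ hi →
    (∀ i, i < lo → norm.getD i "" < key) →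
    (∀ i, hi ≤ i → i < norm.length → ¬ norm.getD i "" < key) →
    lo ≤ pvBS norm key lo hi ∧ pvBS norm key lo hi ≤ hi ∧
    (∀ i, i < pvBS norm key lo hi → norm.getD i "" < key) ∧
    (∀ i, pvBS norm key lo hi ≤ i → i < norm.length → ¬ norm.getD i "" < key) := by
  intro n
  induction n using Nat.strong_induction_on with
  | _ n ih =>
    intro lo hi hn hhi hlohi hlow hhigh
    rw [pvBS]
    by_cases h : lo < hi
    · simp only [h, dif_pos]
      have hmidlt : (lo + hi) / 2 < norm.length := by omega
      by_cases hm : norm.getD ((lo + hi) / 2) "" < key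
      · simp only [hm, if_pos]
        have hrec := ih (hi - ((lo + hi) / 2 + 1)) (by omega) ((lo + hi) / 2 + 1) hi rfl hhi (by omega)
          (fun i hi' => lt_of_le_of_lt (pvGetD_mono norm hs (by omega) hmidlt) hm)
          hhigh
        exact ⟨by omega, hrec.2.1, hrec.2.2⟩
      · simp only [hm, if_false]
        have hrec := ih ((lo + hi) / 2 - lo) (by omega) lo ((lo + hi) / 2) rfl (by omega) (by omega)
          hlow
          (fun i hle hlt => fun hlt' =>
            hm (lt_of_le_of_lt (pvGetD_mono norm hs hle hlt) hlt'))
        exact ⟨hrec.1, by omega, hrec.2.2⟩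
    · simp only [h, dif_neg, not_false_iff]
      exact ⟨Nat.le_refl lo, by omega, hlow, fun i hle hlt => hhigh i (by omega) hlt⟩

-- B's binary-search membership test is exactly list membership on a sorted list
theorem pvFound_iff (norm : List String) (key : String)
    (hs : norm.Pairwise (· ≤ ·)) : pvFound norm key = true ↔ key ∈ norm := by
  obtain ⟨-, hle, hlow, hhigh⟩ := pvBS_spec norm key hs norm.length 0 norm.length rfl
    (le_refl _) (Nat.zero_le _) (fun i hi => absurd hi (Nat.not_lt_zero i))
    (fun i hle hlt => absurd hlt (by omega))
  set r := pvBS norm key 0 norm.length with hr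
  unfold pvFound
  rw [← hr]
  constructor
  · intro hfound
    simp only [Bool.and_eq_true, decide_eq_true_eq, beq_iff_eq] at hfound
    obtain ⟨hlt, heq⟩ := hfound
    rw [norm.getD_eq_getElem "" hlt] at heq
    exact heq ▸ List.getElem_mem hlt
  · intro hmem
    obtain ⟨j, hj, hjeq⟩ := List.mem_iff_getElem.mp hmem
    have hjr : r ≤ j := by
      by_contra hc
      have := hlow j (by omega)
      rw [norm.getD_eq_getElem "" hj, hjeq] at this
      exact lt_irrefl _ this
    have hrlt : r < norm.length := by omega
    have h1 : ¬ norm.getD r "" < key := hhigh r (le_refl _) hrlt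
    have h2 : norm.getD r "" ≤ key := by
      have := pvGetD_mono norm hs hjr hj
      rwa [norm.getD_eq_getElem "" hj, hjeq] at this
    have : norm.getD r "" = key := le_antisymm h2 (not_lt.mp h1)
    simp only [Bool.and_eq_true, decide_eq_true_eq, beq_iff_eq]
    exact ⟨hrlt, this⟩

-- ===== VERDICT (by name: the statement is the Claim_ definition above) =====
theorem should_share_with_member_py_spec : Claim_equal_should_share_with_member_py := by
  intro member_id user_info share_members _
  unfold Spec_should_share_with_member_py
  unfold should_share_with_member_py should_share_with_member_py_alt
  cases share_members with
  | none => rfl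
  | some sm =>
    simp only
    by_cases hsm : sm.isEmpty
    · simp [hsm]
    · rw [Bool.not_eq_true] at hsm
      simp only [hsm, Bool.false_eq_true, if_false]
      cases user_info with
      | none => rfl
      | some ui =>
        simp only
        by_cases hui : ui.isEmpty
        · simp [hui]
        · rw [Bool.not_eq_true] at hui
          simp only [hui, Bool.false_eq_true, if_false]
          set f : String → String := fun s => PySem.Str.lower (PySem.Str.strip s) with hf
          set sid := PySem.Str.lower (PySem.Dict.getD ⟨ui⟩ "slackId" "") with hsid
          set em := PySem.Str.lower (PySem.Dict.getD ⟨ui⟩ "email" "") with hem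
          set dn := PySem.Str.lower (PySem.Str.strip (PySem.Dict.getD ⟨ui⟩ "displayName" "")) with hdn
          set norm := PySem.List.sorted ((sm.filter (fun s => s ≠ "")).map f) (fun x => x) false with hnorm
          have hsorted : norm.Pairwise (· ≤ ·) := PySem.List.sorted_pairwise _ _
          have hmem : ∀ k, pvFound norm k = true ↔ ∃ id ∈ sm, id ≠ "" ∧ f id = k := by
            intro k
            rw [pvFound_iff norm k hsorted, hnorm, PySem.List.mem_sorted]
            simp only [List.mem_map, List.mem_filter, decide_eq_true_eq]
            constructor
            · rintro ⟨id, ⟨hm, hne⟩, he⟩; exact ⟨id, hm, hne, he⟩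
            · rintro ⟨id, hm, hne, he⟩; exact ⟨id, ⟨hm, hne⟩, he⟩
          rw [Bool.eq_iff_iff, pvLoopA_eq_true_iff]
          constructor
          · rintro ⟨id, hm, hne, hcase⟩
            rcases hcase with hc | ⟨hemne, hc⟩ | ⟨hdnne, hc⟩
            · simp [(hmem sid).mpr ⟨id, hm, hne, hc⟩]
            · by_cases h1 : pvFound norm sid
              · simp [h1]
              · simp [h1, hemne, (hmem em).mpr ⟨id, hm, hne, hc⟩]
            · by_cases h1 : pvFound norm sid
              · simp [h1]
              · by_cases h2 : em ≠ "" ∧ pvFound norm em = true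
                · simp [h1, h2]
                · simp [h1, h2, hdnne, (hmem dn).mpr ⟨id, hm, hne, hc⟩]
          · intro hb
            by_cases h1 : pvFound norm sid
            · obtain ⟨id, hm, hne, he⟩ := (hmem sid).mp h1
              exact ⟨id, hm, hne, Or.inl he⟩
            · simp only [h1, Bool.false_eq_true, if_false] at hb
              by_cases h2 : em ≠ "" ∧ pvFound norm em = true
              · obtain ⟨id, hm, hne, he⟩ := (hmem em).mp h2.2
                exact ⟨id, hm, hne, Or.inr (Or.inl ⟨h2.1, he⟩)⟩
              · simp only [h2, if_false, Bool.and_eq_true, decide_eq_true_eq] at hb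
                obtain ⟨hdnne, hfound⟩ := hb
                obtain ⟨id, hm, hne, he⟩ := (hmem dn).mp hfound
                exact ⟨id, hm, hne, Or.inr (Or.inr ⟨hdnne, he⟩)⟩
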